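-- pv_equiv track=rewrite | github.com/hliu202/leetcode-py | weekly-contest/195/3.py | numSubseq
-- ===== SOURCE A (Python) =====
-- from typing import List
--
-- def numSubseq(nums: List[int], target: int) -> int:
--     nums.sort()
--     n = len(nums)
--     res = 0
--     for i in range(n):
--         if 2 * nums[i] > target:
--             break
--
--         for j in range(i, n):
--             if nums[i] + nums[j] > target:
--                 break
--
--             bt = j - i - 1
--             if bt > 0:
--                 # 二项式定理 2^n
--                 res += pow(2, bt)
--             else:
--                 res += 1
--     return res % (1000000000 + 7)
-- ===== SOURCE B (Python) =====
-- from typing import List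
--
-- def numSubseq(nums: List[int], target: int) -> int:
--     # Two pointers over the sorted list: for each left end l whose best partner
--     # is r, there are 2^(r-l) valid subsequences; p tracks 2^(r-l) since r-l
--     # shrinks by exactly one per iteration.  (Sorts nums in place, like A.)
--     nums.sort()
--     n = len(nums)
--     res = 0
--     l, r = 0, n - 1
--     p = 1 << max(n - 1, 0)
--     while l <= r:
--         if nums[l] + nums[r] <= target:
--             res += p
--             l += 1
--         else:
--             r -= 1
--         p >>= 1
--     return res % (1000000000 + 7)
-- ===== Notes on version B (the rewrite author's own statement) =====
-- stated objective: faster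
-- what changed: Replaces A's nested break-loops (for each left index, scan right summing individual powers of two) by a single sorted two-pointer sweep that adds 2^(r-l) per valid left end, maintaining that power by one halving per step.
import Mathlib
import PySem

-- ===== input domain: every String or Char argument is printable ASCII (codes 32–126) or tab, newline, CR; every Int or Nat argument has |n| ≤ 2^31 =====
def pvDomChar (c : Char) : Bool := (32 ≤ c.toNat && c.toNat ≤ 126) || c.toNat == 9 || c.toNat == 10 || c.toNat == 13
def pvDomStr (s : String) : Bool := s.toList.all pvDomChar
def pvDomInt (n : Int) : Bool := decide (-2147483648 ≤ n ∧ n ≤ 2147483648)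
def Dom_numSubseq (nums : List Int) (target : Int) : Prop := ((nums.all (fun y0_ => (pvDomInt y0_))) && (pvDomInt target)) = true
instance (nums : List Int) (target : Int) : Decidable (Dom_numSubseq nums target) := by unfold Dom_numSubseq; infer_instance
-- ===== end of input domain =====

-- B replaces A's quadratic nested break-loops by a sorted two-pointer sweep that
-- maintains 2^(r-l) by halving; A sorts its argument in place (B does the same),
-- the equivalence proved here is about the return value.

-- ===== PORT A =====
-- inner 'for j in range(i, n)' with break
def numSubseqA_inner (a : List Int) (t : Int) (i : Nat) (j : Nat) (res : Int) : Int :=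
  if _h : j < a.length then
    if a.getD i 0 + a.getD j 0 > t then res
    else
      numSubseqA_inner a t i (j + 1)
        (res + (if ((j : Int) - (i : Int) - 1) > 0 then 2 ^ ((j : Int) - (i : Int) - 1).toNat else 1))
  else res
termination_by a.length - j

-- outer 'for i in range(n)' with break
def numSubseqA_outer (a : List Int) (t : Int) (i : Nat) (res : Int) : Int :=
  if _h : i < a.length then
    if 2 * a.getD i 0 > t then res
    else numSubseqA_outer a t (i + 1) (numSubseqA_inner a t i i res)
  else res
termination_by a.length - i

def numSubseq (nums : List Int) (target : Int) : Int :=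
  PySem.Int.mod (numSubseqA_outer (PySem.List.sorted nums (fun x => x) false) target 0 0)
    (1000000000 + 7)

-- ===== PORT B =====
-- 'while l <= r' two-pointer loop; p >>= 1 each iteration
def numSubseqB_loop (a : List Int) (t : Int) (l r res p : Int) : Int :=
  if _h : l ≤ r then
    if a.getD l.toNat 0 + a.getD r.toNat 0 ≤ t then
      numSubseqB_loop a t (l + 1) r (res + p) (PySem.Int.floordiv p 2)
    else
      numSubseqB_loop a t l (r - 1) res (PySem.Int.floordiv p 2)
  else res
termination_by (r + 1 - l).toNat
decreasing_by all_goals omega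

def numSubseq_alt (nums : List Int) (target : Int) : Int :=
  PySem.Int.mod
    (numSubseqB_loop (PySem.List.sorted nums (fun x => x) false) target 0
      (((PySem.List.sorted nums (fun x => x) false).length : Int) - 1) 0
      (2 ^ ((PySem.List.sorted nums (fun x => x) false).length - 1)))
    (1000000000 + 7)

-- ===== PRECONDITION & SPEC =====
def Spec_numSubseq (nums : List Int) (target : Int) (out : Int) : Prop := out = numSubseq_alt nums target
instance (nums : List Int) (target : Int) (out : Int) : Decidable (Spec_numSubseq nums target out) := by unfold Spec_numSubseq; infer_instance

-- ===== CLAIM (what is proved, stated in full; the proofs are below) =====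
def Claim_equal_numSubseq : Prop := ∀ (nums : List Int) (target : Int), Dom_numSubseq nums target → Spec_numSubseq nums target (numSubseq nums target)

-- ===== LEMMAS AND PROOFS =====

-- number of elements x of a with a[i] + x ≤ t; on a sorted list the qualifying
-- indices are exactly [0, Mi)
def Mi (a : List Int) (t : Int) (i : Nat) : Nat :=
  (a.takeWhile (fun x => decide (a.getD i 0 + x ≤ t))).length

-- the common mathematical value: Σ_{i=l}^{n-1} [2·a[i] ≤ t] · 2^(Mi i − 1 − i)
def specFrom (a : List Int) (t : Int) (l : Nat) : Int :=
  if _h : l < a.length then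
    (if 2 * a.getD l 0 ≤ t then (2 : Int) ^ (Mi a t l - 1 - l) else 0) + specFrom a t (l + 1)
  else 0
termination_by a.length - l

theorem takeWhile_len_le {α : Type} (p : α → Bool) (a : List α) :
    (a.takeWhile p).length ≤ a.length := by
  induction a with
  | nil => simp
  | cons x xs ih =>
    simp only [List.takeWhile]
    cases p x
    · simp
    · simp; omega

theorem getD_takeWhile_true {α : Type} (p : α → Bool) (a : List α) (d : α) (j : Nat)
    (hj : j < (a.takeWhile p).length) : p (a.getD j d) = true := by
  induction a generalizing j with
  | nil => simp at hj
  | cons x xs ih =>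
    cases hp : p x
    · rw [List.takeWhile_cons_of_neg (by simp [hp])] at hj; simp at hj
    · rw [List.takeWhile_cons_of_pos (by simp [hp])] at hj
      cases j with
      | zero => simpa
      | succ k => simp only [List.length_cons] at hj; exact ih k (by simpa using hj)

theorem getD_takeWhile_false {α : Type} (p : α → Bool) (a : List α) (d : α)
    (hlt : (a.takeWhile p).length < a.length) :
    p (a.getD (a.takeWhile p).length d) = false := by
  induction a with
  | nil => simp at hlt
  | cons x xs ih =>
    cases hp : p x
    · have h0 : List.takeWhile p (x :: xs) = [] := List.takeWhile_cons_of_neg (by simp [hp])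
      rw [h0]
      simpa using hp
    · rw [List.takeWhile_cons_of_pos (by simp [hp])] at hlt ⊢
      simp only [List.length_cons, Nat.add_lt_add_iff_right] at hlt
      simpa using ih hlt

theorem sorted_getD_mono (a : List Int) (hs : a.Pairwise (· ≤ ·)) (i j : Nat)
    (hij : i ≤ j) (hj : j < a.length) : a.getD i 0 ≤ a.getD j 0 := by
  rcases eq_or_lt_of_le hij with rfl | h
  · exact le_refl _
  · rw [List.pairwise_iff_getElem] at hs
    rw [List.getD_eq_getElem a 0 (show i < a.length by omega), List.getD_eq_getElem a 0 hj]
    exact hs i j (by omega) hj h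

-- characterisation: for sorted a, a[i] + a[j] ≤ t ↔ j < Mi a t i
theorem Mi_char (a : List Int) (t : Int) (hs : a.Pairwise (· ≤ ·)) (i j : Nat)
    (hj : j < a.length) : (a.getD i 0 + a.getD j 0 ≤ t) ↔ j < Mi a t i := by
  constructor
  · intro hle
    by_contra hnot
    have hM : Mi a t i ≤ j := by omega
    have hMn : (a.takeWhile (fun x => decide (a.getD i 0 + x ≤ t))).length < a.length :=
      lt_of_le_of_lt hM hj
    have hf : ¬ (a.getD i 0 + a.getD (Mi a t i) 0 ≤ t) := by
      simpa [Mi] using getD_takeWhile_false (fun x => decide (a.getD i 0 + x ≤ t)) a 0 hMn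
    have hmono := sorted_getD_mono a hs (Mi a t i) j hM hj
    omega
  · intro hlt
    have := getD_takeWhile_true (fun x => decide (a.getD i 0 + x ≤ t)) a 0 j hlt
    simpa using this

theorem Mi_le_len (a : List Int) (t : Int) (i : Nat) : Mi a t i ≤ a.length :=
  takeWhile_len_le _ a

theorem Mi_gt_self (a : List Int) (t : Int) (hs : a.Pairwise (· ≤ ·)) (i : Nat)
    (hi : i < a.length) (ht : 2 * a.getD i 0 ≤ t) : i < Mi a t i := by
  have := (Mi_char a t hs i i hi).mp (by omega)
  exact this

-- A's inner loop, past the first step: a closed form for the remaining sum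
theorem innerA_closed (a : List Int) (t : Int) (hs : a.Pairwise (· ≤ ·)) (i : Nat)
    (hi : i < a.length) (ht : 2 * a.getD i 0 ≤ t) :
    ∀ d j res, j + d = Mi a t i → i < j → j ≤ Mi a t i →
      numSubseqA_inner a t i j res
        = res + 2 ^ (Mi a t i - 1 - i) - 2 ^ (j - i - 1) := by
  intro d
  induction d with
  | zero =>
    intro j res hjd hij hjM
    have hexp : Mi a t i - 1 - i = j - i - 1 := by omega
    rw [numSubseqA_inner]
    by_cases h1 : j < a.length
    · have hgt : a.getD i 0 + a.getD j 0 > t := by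
        by_contra hle
        have := (Mi_char a t hs i j h1).mp (by omega)
        omega
      rw [dif_pos h1, if_pos hgt, hexp]
      ring
    · rw [dif_neg h1, hexp]
      ring
  | succ d ih =>
    intro j res hjd hij hjM
    have hjlt : j < Mi a t i := by omega
    have hjn : j < a.length := lt_of_lt_of_le hjlt (Mi_le_len a t i)
    have hle : a.getD i 0 + a.getD j 0 ≤ t := (Mi_char a t hs i j hjn).mpr hjlt
    rw [numSubseqA_inner]
    simp only [hjn, dif_pos]
    rw [if_neg (by omega)]
    have hrec := ih (j + 1) (res + (if ((j : Int) - (i : Int) - 1) > 0 then 2 ^ ((j : Int) - (i : Int) - 1).toNat else 1)) (by omega) (by omega) (by omega)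
    rw [hrec]
    have hc : (if ((j : Int) - (i : Int) - 1) > 0 then (2:Int) ^ ((j : Int) - (i : Int) - 1).toNat else 1) = 2 ^ (j - i - 1) := by
      split_ifs with h
      · congr 1; omega
      · have : j - i - 1 = 0 := by omega
        rw [this]; rfl
    rw [hc]
    have hpow : (2:Int) ^ (j + 1 - i - 1) = 2 ^ (j - i - 1) * 2 := by
      have h1 : j + 1 - i - 1 = (j - i - 1) + 1 := by omega
      rw [h1, pow_succ]
    rw [hpow]
    ring

theorem innerA_eq (a : List Int) (t : Int) (hs : a.Pairwise (· ≤ ·)) (i : Nat)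
    (hi : i < a.length) (ht : 2 * a.getD i 0 ≤ t) (res : Int) :
    numSubseqA_inner a t i i res = res + 2 ^ (Mi a t i - 1 - i) := by
  have hM := Mi_gt_self a t hs i hi ht
  rw [numSubseqA_inner]
  simp only [hi, dif_pos]
  rw [if_neg (by omega)]
  rw [if_neg (by omega)]
  have := innerA_closed a t hs i hi ht (Mi a t i - (i + 1)) (i + 1) (res + 1)
    (by omega) (by omega) (by omega)
  rw [this]
  have : i + 1 - i - 1 = 0 := by omega
  rw [this]
  ring

-- specFrom vanishes when no index from l on satisfies 2·a[k] ≤ t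
theorem specFrom_zero (a : List Int) (t : Int) :
    ∀ d l, a.length - l = d → (∀ k, l ≤ k → k < a.length → ¬ 2 * a.getD k 0 ≤ t) →
      specFrom a t l = 0 := by
  intro d
  induction d with
  | zero =>
    intro l hd _
    rw [specFrom]
    simp only [dif_neg (by omega : ¬ l < a.length)]
  | succ d ih =>
    intro l hd hk
    rw [specFrom]
    have hl : l < a.length := by omega
    simp only [hl, dif_pos]
    rw [if_neg (hk l le_rfl hl), ih (l + 1) (by omega) (fun k h1 h2 => hk k (by omega) h2)]
    ring

theorem specFrom_succ (a : List Int) (t : Int) (l : Nat) (hl : l < a.length) :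
    specFrom a t l
      = (if 2 * a.getD l 0 ≤ t then (2 : Int) ^ (Mi a t l - 1 - l) else 0) + specFrom a t (l + 1) := by
  rw [specFrom]; simp [hl]

theorem outerA_eq (a : List Int) (t : Int) (hs : a.Pairwise (· ≤ ·)) :
    ∀ d i res, a.length - i = d →
      numSubseqA_outer a t i res = res + specFrom a t i := by
  intro d
  induction d with
  | zero =>
    intro i res hd
    rw [numSubseqA_outer, specFrom]
    simp only [dif_neg (by omega : ¬ i < a.length)]
    ring
  | succ d ih =>
    intro i res hd
    have hi : i < a.length := by omega
    rw [numSubseqA_outer]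
    simp only [hi, dif_pos]
    split_ifs with hbig
    · rw [specFrom_zero a t (a.length - i) i rfl]
      · ring
      · intro k h1 h2 h3
        have := sorted_getD_mono a hs i k h1 h2
        omega
    · rw [ih (i + 1) _ (by omega), innerA_eq a t hs i hi (by omega),
        specFrom_succ a t i hi, if_pos (by omega)]
      ring

-- B's two-pointer loop computes the same sum
theorem loopB_eq (a : List Int) (t : Int) (hs : a.Pairwise (· ≤ ·)) :
    ∀ d (l r res p : Int), (r + 1 - l).toNat = d → 0 ≤ l → r < (a.length : Int) →
      (∀ i : Nat, l ≤ (i : Int) → i < a.length → (Mi a t i : Int) ≤ r + 1) →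
      (l ≤ r → p = 2 ^ (r - l).toNat) →
      numSubseqB_loop a t l r res p = res + specFrom a t l.toNat := by
  intro d
  induction d with
  | zero =>
    intro l r res p hd hl hr hM hp
    have hlr : ¬ l ≤ r := by omega
    rw [numSubseqB_loop]
    simp only [dif_neg hlr]
    rw [specFrom_zero a t (a.length - l.toNat) l.toNat rfl]
    · ring
    · intro k h1 h2 h3
      have hMk := hM k (by omega) h2
      have := Mi_gt_self a t hs k h2 h3
      omega
  | succ d ih =>
    intro l r res p hd hl hr hM hp
    have hlr : l ≤ r := by omega
    have hr0 : 0 ≤ r := by omega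
    have hln : l.toNat < a.length := by omega
    have hrn : r.toNat < a.length := by omega
    have hlrn : l.toNat ≤ r.toNat := by omega
    rw [numSubseqB_loop]
    simp only [dif_pos hlr]
    rw [hp hlr]
    split_ifs with hcase
    · -- a[l] + a[r] ≤ t : contribute 2^(r-l), advance l
      have h2a : 2 * a.getD l.toNat 0 ≤ t := by
        have := sorted_getD_mono a hs l.toNat r.toNat hlrn hrn
        omega
      have hMl : Mi a t l.toNat = r.toNat + 1 := by
        have h1 := (Mi_char a t hs l.toNat r.toNat hrn).mp hcase
        have h2 := hM l.toNat (by omega) hln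
        omega
      rw [ih (l + 1) r (res + 2 ^ (r - l).toNat) _ (by omega) (by omega) hr
        (fun i h1 h2 => hM i (by omega) h2)
        (by
          intro h
          have he : (r - l).toNat = (r - (l + 1)).toNat + 1 := by omega
          rw [he, pow_succ, PySem.Int.floordiv_eq_ediv_of_pos (by norm_num)]
          simp)]
      rw [show (l + 1).toNat = l.toNat + 1 by omega]
      rw [specFrom_succ a t l.toNat hln, if_pos h2a]
      have : Mi a t l.toNat - 1 - l.toNat = (r - l).toNat := by omega
      rw [this]
      ring
    · -- a[l] + a[r] > t : retreat r
      rw [ih l (r - 1) res _ (by omega) hl (by omega)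
        (by
          intro i h1 h2
          have hMi := hM i h1 h2
          by_contra hgt
          have hMieq : (Mi a t i : Int) = r + 1 := by omega
          have hrM : r.toNat < Mi a t i := by omega
          have := (Mi_char a t hs i r.toNat hrn).mpr hrM
          have := sorted_getD_mono a hs l.toNat i (by omega) h2
          omega)
        (by
          intro h
          have he : (r - l).toNat = (r - 1 - l).toNat + 1 := by omega
          rw [he, pow_succ, PySem.Int.floordiv_eq_ediv_of_pos (by norm_num)]
          simp)]

-- ===== VERDICT (by name: the statement is the Claim_ definition above) =====
theorem numSubseq_spec : Claim_equal_numSubseq := by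
  intro nums target _
  unfold Spec_numSubseq numSubseq numSubseq_alt
  set a := PySem.List.sorted nums (fun x => x) false with ha
  have hs : a.Pairwise (· ≤ ·) := PySem.List.sorted_pairwise nums (fun x => x)
  congr 1
  rw [outerA_eq a target hs a.length 0 0 (by omega)]
  rw [loopB_eq a target hs a.length 0 ((a.length : Int) - 1) 0 (2 ^ (a.length - 1))
    (by omega) (by omega) (by omega)
    (fun i h1 h2 => by
      have := Mi_le_len a target i
      omega)
    (by
      intro h
      congr 1
      omega)]
  simp
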